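-- pv_equiv track=rewrite | github.com/ollien/advent-of-code-2019 | day8/py/main.py | stack_layers
-- ===== SOURCE A (Python) =====
-- from typing import Tuple
--
-- def stack_layers(layers: Tuple[Tuple[str]], width: int, height: int) -> Tuple[int]:
--     merged_stacks = []
--     for i in range(height):
--         for j in range(width):
--             stack = []
--             for layer in layers:
--                 stack.append(layer[i * width + j])
--             try:
--                 pixel = next(item for item in stack if item != 2)
--             except StopIteration:
--                 pixel = 0
--
--             merged_stacks.append(pixel)
--
--     return tuple(merged_stacks)
-- ===== SOURCE B (Python) =====
-- def stack_layers(layers, width, height):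
--     n = max(0, width) * max(0, height)
--     result = [2] * n
--     for layer in layers:
--         for k in range(n):
--             if result[k] == 2 and layer[k] != 2:
--                 result[k] = layer[k]
--     return tuple(0 if p == 2 else p for p in result)
-- ===== Notes on version B (the rewrite author's own statement) =====
-- stated objective: alternative
-- what changed: Replaces A's pixel-major triple loop (building a per-pixel stack of all layer values, then scanning it for the first non-2) by a layer-major single merged buffer: start from an all-sentinel image, fill each still-transparent cell from each layer in order, and finally map remaining sentinels to 0.
import Mathlib
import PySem

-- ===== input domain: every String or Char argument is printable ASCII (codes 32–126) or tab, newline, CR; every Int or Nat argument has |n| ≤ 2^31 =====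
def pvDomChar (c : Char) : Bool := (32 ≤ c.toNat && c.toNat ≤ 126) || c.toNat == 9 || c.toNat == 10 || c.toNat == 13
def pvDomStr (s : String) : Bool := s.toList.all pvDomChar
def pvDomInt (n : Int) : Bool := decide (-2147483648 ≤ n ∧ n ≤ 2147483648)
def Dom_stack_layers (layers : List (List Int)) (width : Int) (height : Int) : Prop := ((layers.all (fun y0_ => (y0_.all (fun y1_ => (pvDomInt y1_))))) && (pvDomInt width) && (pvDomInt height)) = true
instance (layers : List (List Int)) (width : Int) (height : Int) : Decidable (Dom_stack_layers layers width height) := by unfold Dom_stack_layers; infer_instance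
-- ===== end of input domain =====

-- B replaces A's pixel-major triple loop (per-pixel stack of all layer values, scanned for the
-- first non-2) by a layer-major fill of one sentinel-initialised merged buffer (objective:
-- alternative decomposition, same asymptotic cost).

-- ===== PORT A =====
-- literal transliteration of A; layer[i*width+j] is PySem.List.pyGetD (total form, exact under Pre_)
def stack_layers (layers : List (List Int)) (width : Int) (height : Int) : List Int :=
  (PySem.List.pyRange 0 height 1).foldl (fun merged i =>
    (PySem.List.pyRange 0 width 1).foldl (fun merged j =>
      let stack : List Int :=
        layers.foldl (fun stack layer => stack ++ [PySem.List.pyGetD layer (i * width + j) 0]) []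
      let pixel : Int := (stack.find? (fun item => item != 2)).getD 0
      merged ++ [pixel]) merged) []

-- ===== PORT B =====
-- literal transliteration of Source B (indices in B are always ≥ 0, so layer[k] is List.getD, exact under Pre_)
def stack_layers_alt (layers : List (List Int)) (width : Int) (height : Int) : List Int :=
  let n : Nat := ((max 0 width) * (max 0 height)).toNat
  let result : List Int :=
    layers.foldl (fun result layer =>
      (List.range n).foldl (fun result k =>
        if result.getD k 0 == 2 && layer.getD k 0 != 2 then result.set k (layer.getD k 0)
        else result) result)
      (List.replicate n 2)
  result.map (fun p => if p == 2 then 0 else p)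

-- ===== PRECONDITION & SPEC =====
-- Pre_ excludes exactly the inputs on which Python A raises an IndexError: when both dimensions
-- are positive, every layer must contain at least width*height pixels.
def Pre_stack_layers (layers : List (List Int)) (width : Int) (height : Int) : Prop :=
  0 < width → 0 < height → ∀ l ∈ layers, width * height ≤ (l.length : Int)
instance (layers : List (List Int)) (width : Int) (height : Int) : Decidable (Pre_stack_layers layers width height) := by unfold Pre_stack_layers; infer_instance
def pvWitness_stack_layers : List (List Int) × Int × Int := ([[2, 1, 2, 0], [0, 2, 2, 2]], 2, 2)

def Spec_stack_layers (layers : List (List Int)) (width : Int) (height : Int) (out : List Int) : Prop := out = stack_layers_alt layers width height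
instance (layers : List (List Int)) (width : Int) (height : Int) (out : List Int) : Decidable (Spec_stack_layers layers width height out) := by unfold Spec_stack_layers; infer_instance

-- ===== CLAIM (what is proved, stated in full; the proofs are below) =====
def Claim_equal_stack_layers : Prop := ∀ (layers : List (List Int)) (width : Int) (height : Int), Dom_stack_layers layers width height → Pre_stack_layers layers width height → Spec_stack_layers layers width height (stack_layers layers width height)



-- ===== LEMMAS AND PROOFS =====

-- the common closed form: pixel k is the first non-2 value among the layers' k-th entries, else 0
def pvPix (layers : List (List Int)) (k : Nat) : Int :=
  ((layers.map (fun l => l.getD k 0)).find? (fun v => v != 2)).getD 0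

def pvN (width height : Int) : Nat := width.toNat * height.toNat

-- the per-cell merge step of B
def pvG (acc v : Int) : Int := if acc == 2 && v != 2 then v else acc

theorem pvRangeMul (f : Nat → Int) (h w : Nat) :
    (List.range (h * w)).map f
      = (List.range h).flatMap (fun a => (List.range w).map (fun b => f (a * w + b))) := by
  induction h with
  | zero => simp
  | succ h ih =>
    rw [Nat.succ_mul, List.range_add, List.range_succ]
    simp [ih, List.map_map, Function.comp_def]

-- the shape of A's two pixel loops: append-one-pixel folds are a flatMap of rows
theorem pvA_loop (pix : Nat → Nat → Int) (h w : Nat) (acc : List Int) :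
    (List.range h).foldl (fun merged a =>
        (List.range w).foldl (fun merged b => merged ++ [pix a b]) merged) acc
      = acc ++ (List.range h).flatMap (fun a => (List.range w).map (fun b => pix a b)) := by
  induction h generalizing acc with
  | zero => simp
  | succ h ih =>
    rw [List.range_succ, List.foldl_append]
    simp only [List.foldl_cons, List.foldl_nil]
    rw [ih, PySem.List.foldl_append_singleton_eq_map]
    simp [List.flatMap_append, List.append_assoc]

theorem pvA_closed (layers : List (List Int)) (width height : Int) :
    stack_layers layers width height =
      (List.range (pvN width height)).map (pvPix layers) := by
  unfold stack_layers
  rw [PySem.List.pyRange_one 0 height, PySem.List.pyRange_one 0 width]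
  simp only [zero_add, Int.sub_zero, List.foldl_map]
  rw [pvA_loop, List.nil_append]
  by_cases hw : width.toNat = 0
  · simp [hw, pvN]
  · have hwc : width = (width.toNat : Int) := by omega
    have key : ∀ (a b : Nat),
        ((layers.foldl (fun stack layer =>
            stack ++ [PySem.List.pyGetD layer ((a : Int) * width + (b : Int)) 0]) []).find?
          (fun item => item != 2)).getD 0 = pvPix layers (a * width.toNat + b) := by
      intro a b
      rw [PySem.List.foldl_append_singleton_eq_map, List.nil_append]
      have hidx : (a : Int) * width + (b : Int) = ((a * width.toNat + b : Nat) : Int) := by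
        conv_lhs => rw [hwc]
        push_cast; ring
      rw [hidx]
      simp only [PySem.List.pyGetD_natCast]
      rfl
    simp only [key]
    rw [show pvN width height = height.toNat * width.toNat from by unfold pvN; ring, pvRangeMul]

-- B's inner index loop: length is preserved …
theorem pvInner_length (layer res : List Int) (m : Nat) :
    ((List.range m).foldl (fun r k =>
        if r.getD k 0 == 2 && layer.getD k 0 != 2 then r.set k (layer.getD k 0) else r)
      res).length = res.length := by
  induction m with
  | zero => rfl
  | succ m ih =>
    rw [List.range_succ, List.foldl_append]
    simp only [List.foldl_cons, List.foldl_nil]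
    split
    · rw [List.length_set]; exact ih
    · exact ih

-- … and it writes a layer value exactly into the still-sentinel cells below the bound
theorem pvInner_getD (layer res : List Int) (m k : Nat) :
    ((List.range m).foldl (fun r k =>
        if r.getD k 0 == 2 && layer.getD k 0 != 2 then r.set k (layer.getD k 0) else r)
      res).getD k 0
      = if k < m then pvG (res.getD k 0) (layer.getD k 0) else res.getD k 0 := by
  induction m generalizing k with
  | zero => simp
  | succ m ih =>
    rw [List.range_succ, List.foldl_append]
    simp only [List.foldl_cons, List.foldl_nil]
    set F := (List.range m).foldl (fun r k =>
        if r.getD k 0 == 2 && layer.getD k 0 != 2 then r.set k (layer.getD k 0) else r) res with hF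
    have hFm : F.getD m 0 = res.getD m 0 := by rw [ih]; simp
    have hFlen : F.length = res.length := pvInner_length layer res m
    by_cases hc : (F.getD m 0 == 2 && layer.getD m 0 != 2) = true
    · rw [if_pos hc]
      by_cases hk : k = m
      · subst hk
        by_cases hlt : k < F.length
        · have hset : (F.set k (layer.getD k 0)).getD k 0 = layer.getD k 0 := by
            rw [List.getD_eq_getElem?_getD, List.getElem?_set, if_pos rfl, if_pos hlt]; rfl
          rw [hset, if_pos (Nat.lt_succ_self k), pvG]
          rw [hFm] at hc
          rw [if_pos hc]
        · exfalso
          have hz : res.getD k 0 = 0 := List.getD_eq_default _ _ (by omega)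
          rw [hFm, hz] at hc
          simp at hc
      · have hset : (F.set m (layer.getD m 0)).getD k 0 = F.getD k 0 := by
          rw [List.getD_eq_getElem?_getD, List.getElem?_set, if_neg (fun h => hk h.symm),
            ← List.getD_eq_getElem?_getD]
        rw [hset, ih]
        by_cases hkm : k < m
        · rw [if_pos hkm, if_pos (by omega)]
        · rw [if_neg hkm, if_neg (by omega)]
    · rw [if_neg hc]
      by_cases hk : k = m
      · subst hk
        rw [hFm] at hc
        rw [ih, if_neg (show ¬ k < k by omega), if_pos (Nat.lt_succ_self k), pvG, if_neg hc]
      · rw [ih]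
        by_cases hkm : k < m
        · rw [if_pos hkm, if_pos (by omega)]
        · rw [if_neg hkm, if_neg (by omega)]

theorem pvOuter_length (n : Nat) (layers : List (List Int)) (res : List Int) :
    (layers.foldl (fun result layer =>
        (List.range n).foldl (fun r k =>
          if r.getD k 0 == 2 && layer.getD k 0 != 2 then r.set k (layer.getD k 0) else r)
          result) res).length = res.length := by
  induction layers generalizing res with
  | nil => rfl
  | cons l ls ih => rw [List.foldl_cons, ih, pvInner_length]

theorem pvOuter_getD (n : Nat) (layers : List (List Int)) (res : List Int) (k : Nat) :
    (layers.foldl (fun result layer =>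
        (List.range n).foldl (fun r k =>
          if r.getD k 0 == 2 && layer.getD k 0 != 2 then r.set k (layer.getD k 0) else r)
          result) res).getD k 0
      = if k < n then (layers.map (fun l => l.getD k 0)).foldl pvG (res.getD k 0)
        else res.getD k 0 := by
  induction layers generalizing res with
  | nil => simp
  | cons l ls ih =>
    rw [List.foldl_cons, ih, pvInner_getD]
    by_cases hk : k < n
    · rw [if_pos hk, if_pos hk, if_pos hk]; rfl
    · rw [if_neg hk, if_neg hk, if_neg hk]

theorem pvFoldG (vals : List Int) (a : Int) :
    vals.foldl pvG a = if a == 2 then (vals.find? (fun v => v != 2)).getD 2 else a := by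
  induction vals generalizing a with
  | nil =>
    simp only [List.foldl_nil, List.find?_nil, Option.getD_none]
    by_cases h : a = 2
    · subst h; simp
    · rw [if_neg (by simpa using h)]
  | cons v vs ih =>
    rw [List.foldl_cons]
    by_cases ha : a = 2
    · subst ha
      by_cases hv : v = 2
      · subst hv
        have hg : pvG 2 2 = 2 := by simp [pvG]
        rw [hg, ih, List.find?_cons]
        simp
      · have hb : (v != 2) = true := by simpa using hv
        have hv2 : (v == 2) = false := by simpa using hv
        have hg : pvG 2 v = v := by simp [pvG, hb]
        rw [hg, ih, hv2, List.find?_cons, hb]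
        simp
    · have ha' : (a == 2) = false := by simpa using ha
      have hg : pvG a v = a := by simp [pvG, ha']
      rw [hg, ih, ha']
      simp

theorem pvB_closed (layers : List (List Int)) (width height : Int) :
    stack_layers_alt layers width height =
      (List.range (pvN width height)).map (pvPix layers) := by
  have hn : ((max 0 width) * (max 0 height)).toNat = pvN width height := by
    have h1 : max 0 width = (width.toNat : Int) := by omega
    have h2 : max 0 height = (height.toNat : Int) := by omega
    rw [h1, h2, ← Nat.cast_mul, Int.toNat_natCast]; rfl
  simp only [stack_layers_alt]
  rw [hn]
  set n := pvN width height with hnn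
  set result := layers.foldl (fun result layer =>
      (List.range n).foldl (fun r k =>
        if r.getD k 0 == 2 && layer.getD k 0 != 2 then r.set k (layer.getD k 0) else r)
        result) (List.replicate n 2) with hres
  have hlen : result.length = n := by
    rw [hres, pvOuter_length, List.length_replicate]
  apply List.ext_getElem
  · rw [List.length_map, hlen, List.length_map, List.length_range]
  · intro k h1 h2
    rw [List.getElem_map, List.getElem_map, List.getElem_range]
    have hk : k < n := by rw [List.length_map, hlen] at h1; exact h1
    have hgd : result[k] = result.getD k 0 := (List.getD_eq_getElem result 0 (by omega)).symm
    rw [hgd, hres, pvOuter_getD, if_pos hk, List.getD_replicate _ hk, pvFoldG,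
      if_pos (by rfl : (((2 : Int)) == 2) = true)]
    unfold pvPix
    cases hfind : (layers.map (fun l => l.getD k 0)).find? (fun v => v != 2) with
    | none => simp
    | some v =>
      have hv := List.find?_some hfind
      have hv2 : (v == 2) = false := by
        simp only [bne_iff_ne, ne_eq] at hv
        simpa using hv
      simp [hv2]

-- ===== VERDICT (by name: the statement is the Claim_ definition above) =====
theorem stack_layers_spec : Claim_equal_stack_layers := by
  intro layers width height _ _
  unfold Spec_stack_layers
  rw [pvA_closed, pvB_closed]
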